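-- pv_equiv track=rewrite | github.com/Alexhuszagh/XLDiscoverer | xldlib/xlpy/matched/protein_prospector/hierarchical.py | amp
-- ===== SOURCE A (Python) =====
-- def level(string, lst=None):
--     '''
--     Parse new level by extracting paired ().
--     :
--         >>> level"(1&(18|22))|(13&22)"
--         ['1&(18|22)', '13&22']
--     '''
--
--     if lst is None:
--         lst = []
--
--     while '(' in string:
--         i = string.find('(')+1
--         index = i
--         step = 1
--
--         while step != 0:
--             if string[index] == '(':
--                 step += 1
--             elif string[index] == ')':
--                 step -= 1
--             index += 1
--
--         lst.append(string[i:index - 1])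
--         string = string[index:]
--
--     return lst
--
-- def amp(string):
--     '''
--     Combine integer preceeding '&' with all of level.
--     :
--         >>> amp('1&(18|22)')
--         ['1&18|22']
--     '''
--
--     lst = []
--
--     i = string.find('&(')
--     tmp = string[0:i]
--     child = []
--     level(string[i:], child)
--
--     lst.extend('{0}&{1}'.format(tmp, i) for i in child)
--
--     return lst
-- ===== SOURCE B (Python) =====
-- def amp(string):
--     i = string.find('&(')
--     if i == -1:
--         return []
--     prefix = string[:i] + '&'
--     out = []
--     depth = 0
--     cur = []
--     for c in string[i:]:
--         if depth == 0:
--             if c == '(':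
--                 depth = 1
--                 cur = []
--         elif c == '(':
--             depth += 1
--             cur.append(c)
--         elif c == ')':
--             depth -= 1
--             if depth == 0:
--                 out.append(prefix + ''.join(cur))
--             else:
--                 cur.append(c)
--         else:
--             cur.append(c)
--     return out
-- ===== Notes on version B (the rewrite author's own statement) =====
-- stated objective: faster
-- what changed: A repeatedly re-scans and re-slices the remaining string (find + char-by-char bracket matching + slicing the tail each iteration, quadratic); B makes one left-to-right pass over the suffix after '&(' tracking the parenthesis depth and emitting a group each time the depth returns to zero.
import Mathlib
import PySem

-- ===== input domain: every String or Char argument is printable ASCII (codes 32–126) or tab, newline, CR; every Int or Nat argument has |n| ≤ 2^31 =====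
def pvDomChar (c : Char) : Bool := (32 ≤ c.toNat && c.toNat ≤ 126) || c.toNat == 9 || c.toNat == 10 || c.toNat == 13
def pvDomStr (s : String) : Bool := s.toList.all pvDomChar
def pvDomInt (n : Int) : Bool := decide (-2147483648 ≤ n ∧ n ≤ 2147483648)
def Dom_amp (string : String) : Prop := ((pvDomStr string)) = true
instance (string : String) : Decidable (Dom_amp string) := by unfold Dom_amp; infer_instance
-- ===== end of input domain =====

-- B replaces A's repeated find/rescan/reslice extraction by a single left-to-right pass
-- tracking parenthesis depth (asymptotically faster in a timing run).

-- ===== PORT A =====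
-- inner 'while step != 0' loop of level: scans from position `index`, returns the final
-- index (one past the matching ')') or none where Python raises IndexError at the string end.
def pvInner (cs : List Char) (step : Int) (index : Nat) : Option Nat :=
  if step = 0 then some index
  else match cs with
    | [] => none  -- string[index] raises IndexError here
    | c :: rest =>
        pvInner rest (if c = '(' then step + 1 else if c = ')' then step - 1 else step)
          (index + 1)

-- needed by pvLevel's termination: the inner loop moves the index strictly forward
theorem pvInner_bounds (cs : List Char) (step : Int) (index r : Nat)
    (h : pvInner cs step index = some r) : index ≤ r ∧ (step ≠ 0 → index < r) ∧ r ≤ index + cs.length := by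
  induction cs generalizing step index with
  | nil =>
    unfold pvInner at h
    by_cases hs : step = 0
    · simp [hs] at h; omega
    · simp [hs] at h
  | cons c rest ih =>
    unfold pvInner at h
    by_cases hs : step = 0
    · simp [hs] at h; simp; omega
    · simp [hs] at h
      have := ih _ _ h
      simp; omega

-- outer 'while "(" in string' loop of level (string[i:index-1] = (drop i).take (index-1-i),
-- string[index:] = drop index: exact for these nonnegative indices)
def pvLevel (cs : List Char) (lst : List (List Char)) : List (List Char) :=
  if hpar : PySem.Chars.isIn ['('] cs = true then
    -- i = string.find('(') + 1, written out at each use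
    match hr : pvInner (cs.drop (PySem.Chars.find cs ['('] + 1).toNat) 1
        ((PySem.Chars.find cs ['('] + 1).toNat) with
    | none => lst   -- Python raises IndexError (unbalanced '('); excluded by Pre_amp
    | some index =>
        pvLevel (cs.drop index)
          (lst ++ [(cs.drop (PySem.Chars.find cs ['('] + 1).toNat).take
              (index - 1 - (PySem.Chars.find cs ['('] + 1).toNat)])
  else lst
termination_by cs.length
decreasing_by
  have hb := pvInner_bounds _ _ _ _ hr
  have hne : cs ≠ [] := by
    intro hnil; rw [hnil] at hpar; simp [PySem.Chars.isIn_iff_infix] at hpar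
  have : 0 < cs.length := List.length_pos_iff.mpr hne
  have : 1 ≤ index := by omega
  simp [List.length_drop]; omega

def amp (string : String) : List String :=
  let cs := string.toList
  let i : Int := PySem.Chars.find cs ['&', '(']          -- string.find('&(')
  let tmp := PySem.List.slice cs (some 0) (some i)       -- string[0:i]
  let child := pvLevel (PySem.List.slice cs (some i) none) []   -- level(string[i:], child)
  child.map (fun seg => String.ofList (tmp ++ '&' :: seg))   -- '{0}&{1}'.format(tmp, i)

-- ===== PORT B =====
-- one step of Source B's for-loop: state (depth, cur, out)
def pvStepB (pre : List Char) (st : Int × List Char × List (List Char)) (c : Char) :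
    Int × List Char × List (List Char) :=
  match st with
  | (depth, cur, out) =>
    if depth = 0 then
      if c = '(' then (1, [], out) else (depth, cur, out)
    else if c = '(' then (depth + 1, cur ++ [c], out)
    else if c = ')' then
      if depth = 1 then (0, cur, out ++ [pre ++ cur])   -- out.append(prefix + ''.join(cur))
      else (depth - 1, cur ++ [c], out)
    else (depth, cur ++ [c], out)

def amp_alt (string : String) : List String :=
  let cs := string.toList
  let i : Int := PySem.Chars.find cs ['&', '(']          -- string.find('&(')
  if i = -1 then []
  else
    let pre := cs.take i.toNat ++ ['&']                  -- string[:i] + '&'  (i ≥ 0: take is exact)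
    let rest := cs.drop i.toNat                          -- string[i:]
    ((rest.foldl (pvStepB pre) (0, [], [])).2.2).map String.ofList

-- ===== PRECONDITION & SPEC =====
-- clamped parenthesis depth after scanning cs starting from depth d
def pvCd (cs : List Char) (d : Int) : Int :=
  cs.foldl (fun a c => if c = '(' then a + 1 else if c = ')' then max (a - 1) 0 else a) d

-- Pre_ excludes exactly the inputs on which A raises IndexError: those where the suffix that
-- level scans (from the first '&(', or just the last character when there is none) contains an
-- unmatched '(' — i.e. its clamped parenthesis depth does not return to 0.
def Pre_amp (string : String) : Prop :=
  pvCd (if PySem.Chars.find string.toList ['&', '('] = -1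
        then string.toList.drop (string.toList.length - 1)
        else string.toList.drop (PySem.Chars.find string.toList ['&', '(']).toNat) 0 = 0

instance (string : String) : Decidable (Pre_amp string) := by unfold Pre_amp; infer_instance

def pvWitness_amp : String := "1&(18|22)"

def Spec_amp (string : String) (out : List String) : Prop := out = amp_alt string
instance (string : String) (out : List String) : Decidable (Spec_amp string out) := by unfold Spec_amp; infer_instance

-- ===== CLAIM (what is proved, stated in full; the proofs are below) =====
def Claim_equal_amp : Prop := ∀ (string : String), Dom_amp string → Pre_amp string → Spec_amp string (amp string)

-- ===== LEMMAS AND PROOFS =====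

-- singleton infix is membership
theorem pv_singleton_infix (c : Char) (cs : List Char) : ([c] <:+: cs) ↔ c ∈ cs := by
  constructor
  · intro h; exact h.mem (by simp)
  · intro h; obtain ⟨p, q, rfl⟩ := List.mem_iff_append.mp h; exact ⟨p, q, by simp⟩

-- at depth 0 the emitted output does not depend on `cur`
theorem pv_foldB_cur (pre : List Char) (cs : List Char) :
    ∀ (cur cur' : List Char) (out : List (List Char)),
    (List.foldl (pvStepB pre) (0, cur, out) cs).2.2
      = (List.foldl (pvStepB pre) (0, cur', out) cs).2.2 := by
  induction cs with
  | nil => intro cur cur' out; rfl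
  | cons c rest ih =>
    intro cur cur' out
    by_cases hc : c = '('
    · simp [List.foldl_cons, pvStepB, hc]
    · simp only [List.foldl_cons, pvStepB, if_neg hc]
      exact ih cur cur' out

-- with no '(' the fold at depth 0 is the identity
theorem pv_foldB_noparen (pre : List Char) (cs : List Char) (h : '(' ∉ cs) :
    ∀ (cur : List Char) (out : List (List Char)),
    List.foldl (pvStepB pre) (0, cur, out) cs = (0, cur, out) := by
  induction cs with
  | nil => intro cur out; rfl
  | cons c rest ih =>
    intro cur out
    have hc : c ≠ '(' := by intro hc; exact h (by simp [hc])
    have hr : '(' ∉ rest := by intro hm; exact h (by simp [hm])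
    simp only [List.foldl_cons, pvStepB, if_neg hc]
    exact ih hr cur out

-- B's fold across the region A's inner loop scans: the matched group is emitted
theorem pv_foldB_inner (cs : List Char) : ∀ (d : Int) (acc r : Nat), 1 ≤ d →
    pvInner cs d acc = some r →
    ∀ (pre cur : List Char) (out : List (List Char)),
    (List.foldl (pvStepB pre) (d, cur, out) cs).2.2
      = (List.foldl (pvStepB pre) (0, [], out ++ [pre ++ cur ++ cs.take (r - acc - 1)])
          (cs.drop (r - acc))).2.2 := by
  induction cs with
  | nil =>
    intro d acc r hd h
    unfold pvInner at h
    have : ¬ d = 0 := by omega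
    simp [this] at h
  | cons c rest ih =>
    intro d acc r hd h pre cur out
    have hd0 : ¬ d = 0 := by omega
    unfold pvInner at h
    simp only [if_neg hd0] at h
    by_cases hc : c = '('
    · -- depth increases
      subst hc
      simp at h
      have hb := pvInner_bounds _ _ _ _ h
      obtain ⟨m, hm⟩ : ∃ m, r = acc + 2 + m := ⟨r - acc - 2, by have := hb.2.1 (by omega); omega⟩
      subst hm
      have ih' := ih (d + 1) (acc + 1) _ (by omega) h pre (cur ++ ['(']) out
      rw [show acc + 2 + m - (acc + 1) - 1 = m from by omega,
          show acc + 2 + m - (acc + 1) = m + 1 from by omega] at ih'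
      rw [List.foldl_cons,
          show pvStepB pre (d, cur, out) '(' = (d + 1, cur ++ ['('], out) from by
            simp [pvStepB, hd0],
          ih',
          show acc + 2 + m - acc - 1 = m + 1 from by omega,
          show acc + 2 + m - acc = (m + 1) + 1 from by omega,
          List.take_succ_cons, List.drop_succ_cons,
          show pre ++ (cur ++ ['(']) ++ rest.take m = pre ++ cur ++ '(' :: rest.take m from by
            simp]
    · by_cases hcr : c = ')'
      · subst hcr
        simp at h
        by_cases hd1 : d = 1
        · -- the matching ')': the group is complete
          subst hd1
          rw [show (1 : Int) - 1 = 0 from by omega] at h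
          unfold pvInner at h
          simp at h
          subst h
          rw [List.foldl_cons,
              show pvStepB pre (1, cur, out) ')' = (0, cur, out ++ [pre ++ cur]) from by
                simp [pvStepB],
              show acc + 1 - acc - 1 = 0 from by omega,
              show acc + 1 - acc = 0 + 1 from by omega,
              List.take_zero, List.drop_succ_cons, List.drop_zero, List.append_nil]
          exact pv_foldB_cur pre rest cur [] _
        · -- depth decreases but stays positive
          have hb := pvInner_bounds _ _ _ _ h
          obtain ⟨m, hm⟩ : ∃ m, r = acc + 2 + m := ⟨r - acc - 2, by have := hb.2.1 (by omega); omega⟩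
          subst hm
          have ih' := ih (d - 1) (acc + 1) _ (by omega) h pre (cur ++ [')']) out
          rw [show acc + 2 + m - (acc + 1) - 1 = m from by omega,
              show acc + 2 + m - (acc + 1) = m + 1 from by omega] at ih'
          rw [List.foldl_cons,
              show pvStepB pre (d, cur, out) ')' = (d - 1, cur ++ [')'], out) from by
                simp [pvStepB, hd0, hd1],
              ih',
              show acc + 2 + m - acc - 1 = m + 1 from by omega,
              show acc + 2 + m - acc = (m + 1) + 1 from by omega,
              List.take_succ_cons, List.drop_succ_cons,
              show pre ++ (cur ++ [')']) ++ rest.take m = pre ++ cur ++ ')' :: rest.take m from by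
                simp]
      · -- ordinary character inside the group
        simp only [if_neg hc, if_neg hcr] at h
        have hb := pvInner_bounds _ _ _ _ h
        obtain ⟨m, hm⟩ : ∃ m, r = acc + 2 + m := ⟨r - acc - 2, by have := hb.2.1 (by omega); omega⟩
        subst hm
        have ih' := ih d (acc + 1) _ hd h pre (cur ++ [c]) out
        rw [show acc + 2 + m - (acc + 1) - 1 = m from by omega,
            show acc + 2 + m - (acc + 1) = m + 1 from by omega] at ih'
        rw [List.foldl_cons,
            show pvStepB pre (d, cur, out) c = (d, cur ++ [c], out) from by
              simp [pvStepB, hd0, hc, hcr],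
            ih',
            show acc + 2 + m - acc - 1 = m + 1 from by omega,
            show acc + 2 + m - acc = (m + 1) + 1 from by omega,
            List.take_succ_cons, List.drop_succ_cons,
            show pre ++ (cur ++ [c]) ++ rest.take m = pre ++ cur ++ c :: rest.take m from by
              simp]

-- an unmatched '(' means the clamped depth stays positive
theorem pv_cd_inner_none (cs : List Char) : ∀ (d : Int) (acc : Nat), 1 ≤ d →
    pvInner cs d acc = none → 1 ≤ pvCd cs d := by
  induction cs with
  | nil => intro d acc hd _; simpa [pvCd] using hd
  | cons c rest ih =>
    intro d acc hd h
    have hd0 : ¬ d = 0 := by omega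
    unfold pvInner at h
    simp only [if_neg hd0] at h
    by_cases hc : c = '('
    · subst hc
      simp at h
      have := ih (d + 1) (acc + 1) (by omega) h
      simpa [pvCd, List.foldl_cons] using this
    · by_cases hcr : c = ')'
      · subst hcr
        simp at h
        by_cases hd1 : d = 1
        · subst hd1
          rw [show (1 : Int) - 1 = 0 from by omega] at h
          unfold pvInner at h
          simp at h
        · have := ih (d - 1) (acc + 1) (by omega) h
          have hm : max (d - 1) 0 = d - 1 := by omega
          simpa [pvCd, List.foldl_cons, hm] using this
      · simp only [if_neg hc, if_neg hcr] at h
        have := ih d (acc + 1) hd h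
        simpa [pvCd, List.foldl_cons, hc, hcr] using this

-- after a matched group the clamped depth restarts at 0 on the remainder
theorem pv_cd_inner_some (cs : List Char) : ∀ (d : Int) (acc r : Nat), 1 ≤ d →
    pvInner cs d acc = some r → pvCd cs d = pvCd (cs.drop (r - acc)) 0 := by
  induction cs with
  | nil =>
    intro d acc r hd h
    unfold pvInner at h
    have : ¬ d = 0 := by omega
    simp [this] at h
  | cons c rest ih =>
    intro d acc r hd h
    have hd0 : ¬ d = 0 := by omega
    unfold pvInner at h
    simp only [if_neg hd0] at h
    by_cases hc : c = '('
    · subst hc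
      simp at h
      have hb := pvInner_bounds _ _ _ _ h
      obtain ⟨m, hm⟩ : ∃ m, r = acc + 2 + m := ⟨r - acc - 2, by have := hb.2.1 (by omega); omega⟩
      subst hm
      have ih' := ih (d + 1) (acc + 1) _ (by omega) h
      rw [show acc + 2 + m - (acc + 1) = m + 1 from by omega] at ih'
      rw [show acc + 2 + m - acc = (m + 1) + 1 from by omega, List.drop_succ_cons]
      simpa [pvCd, List.foldl_cons] using ih'
    · by_cases hcr : c = ')'
      · subst hcr
        simp at h
        by_cases hd1 : d = 1
        · subst hd1
          rw [show (1 : Int) - 1 = 0 from by omega] at h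
          unfold pvInner at h
          simp at h
          subst h
          rw [show acc + 1 - acc = 0 + 1 from by omega, List.drop_succ_cons, List.drop_zero]
          simp [pvCd, List.foldl_cons]
        · have hb := pvInner_bounds _ _ _ _ h
          obtain ⟨m, hm⟩ : ∃ m, r = acc + 2 + m := ⟨r - acc - 2, by have := hb.2.1 (by omega); omega⟩
          subst hm
          have ih' := ih (d - 1) (acc + 1) _ (by omega) h
          rw [show acc + 2 + m - (acc + 1) = m + 1 from by omega] at ih'
          rw [show acc + 2 + m - acc = (m + 1) + 1 from by omega, List.drop_succ_cons]
          have hm2 : max (d - 1) 0 = d - 1 := by omega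
          simpa [pvCd, List.foldl_cons, hm2] using ih'
      · simp only [if_neg hc, if_neg hcr] at h
        have hb := pvInner_bounds _ _ _ _ h
        obtain ⟨m, hm⟩ : ∃ m, r = acc + 2 + m := ⟨r - acc - 2, by have := hb.2.1 (by omega); omega⟩
        subst hm
        have ih' := ih d (acc + 1) _ hd h
        rw [show acc + 2 + m - (acc + 1) = m + 1 from by omega] at ih'
        rw [show acc + 2 + m - acc = (m + 1) + 1 from by omega, List.drop_succ_cons]
        simpa [pvCd, List.foldl_cons, hc, hcr] using ih'

-- scanning characters with no '(' keeps the clamped depth at 0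
theorem pv_cd_noparen (p : List Char) (h : '(' ∉ p) : pvCd p 0 = 0 := by
  induction p with
  | nil => rfl
  | cons c rest ih =>
    have hc : c ≠ '(' := by intro hc; exact h (by simp [hc])
    have hr : '(' ∉ rest := by intro hm; exact h (by simp [hm])
    by_cases hcr : c = ')'
    · simpa [pvCd, List.foldl_cons, hc, hcr] using ih hr
    · simpa [pvCd, List.foldl_cons, hc, hcr] using ih hr

theorem pv_cd_append (p q : List Char) (d : Int) : pvCd (p ++ q) d = pvCd q (pvCd p d) := by
  simp [pvCd, List.foldl_append]

-- MAIN INVARIANT: on a suffix whose clamped depth returns to 0, B's single pass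
-- produces exactly the groups A's level extracts, each with the prefix attached
theorem pv_main : ∀ (n : Nat) (cs : List Char), cs.length ≤ n →
    ∀ (pre : List Char) (lst : List (List Char)), pvCd cs 0 = 0 →
    (List.foldl (pvStepB pre) (0, [], lst.map (fun seg => pre ++ seg)) cs).2.2
      = (pvLevel cs lst).map (fun seg => pre ++ seg) := by
  intro n
  induction n with
  | zero =>
    intro cs hlen pre lst _
    have : cs = [] := List.length_eq_zero_iff.mp (by omega)
    subst this
    rw [pvLevel]
    simp [PySem.Chars.isIn_iff_infix]
  | succ n ih =>
    intro cs hlen pre lst hcd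
    by_cases hin : PySem.Chars.isIn ['('] cs = true
    · -- decompose at the first '('
      have hinf : ['('] <:+: cs := (PySem.Chars.isIn_iff_infix _ _).mp hin
      have hpos : 0 ≤ PySem.Chars.find cs ['('] := (PySem.Chars.find_nonneg_iff _ _).mpr hinf
      obtain ⟨hpre, hmin⟩ := PySem.Chars.find_spec hpos
      set k : Nat := (PySem.Chars.find cs ['(']).toNat with hk
      obtain ⟨t, ht⟩ := hpre
      have hdk : cs.drop k = '(' :: t := by rw [← ht]; rfl
      have hklen : k < cs.length := by
        have := congrArg List.length hdk
        simp [List.length_drop] at this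
        omega
      have htdrop : cs.drop (k + 1) = t := by
        have h1 : (cs.drop k).tail = cs.drop (k + 1) := List.tail_drop
        rw [hdk] at h1
        simpa using h1.symm
      have hnp : '(' ∉ cs.take k := by
        intro hmem
        obtain ⟨j, hj, hget⟩ := List.mem_iff_getElem.mp hmem
        have hjk : j < k := by simp [List.length_take] at hj; omega
        rw [List.getElem_take] at hget
        refine hmin j hjk ⟨cs.drop (j + 1), ?_⟩
        conv_rhs => rw [List.drop_eq_getElem_cons (show j < cs.length from by omega)]
        rw [hget]
        rfl
      have hsplit : cs = cs.take k ++ '(' :: cs.drop (k + 1) := by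
        conv_lhs => rw [← List.take_append_drop k cs]
        rw [hdk, htdrop]
      -- the clamped depth reaches the first '(' still at 0
      have hcd1 : pvCd (cs.drop (k + 1)) 1 = 0 := by
        rw [hsplit, pv_cd_append, pv_cd_noparen _ hnp] at hcd
        simpa [pvCd, List.foldl_cons] using hcd
      have hi : (PySem.Chars.find cs ['('] + 1).toNat = k + 1 := by omega
      conv_lhs => rw [hsplit]
      rw [List.foldl_append, pv_foldB_noparen pre _ hnp, List.foldl_cons,
          show pvStepB pre (0, [], lst.map (fun seg => pre ++ seg)) '('
              = (1, [], lst.map (fun seg => pre ++ seg)) from by simp [pvStepB]]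
      rw [pvLevel, dif_pos hin]
      split
      · -- the inner scan cannot fail on a balanced suffix
        rename_i heq
        rw [hi] at heq
        have := pv_cd_inner_none _ 1 (k + 1) (by omega) heq
        omega
      · rename_i index heq
        rw [hi] at heq ⊢
        have hb := pvInner_bounds _ _ _ _ heq
        have hlo : k + 1 < index := hb.2.1 (by omega)
        rw [pv_foldB_inner _ 1 (k + 1) index (by omega) heq]
        have hdd : (cs.drop (k + 1)).drop (index - (k + 1)) = cs.drop index := by
          rw [List.drop_drop]
          congr 1
          omega
        rw [hdd,
            show index - (k + 1) - 1 = index - 1 - (k + 1) from by omega,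
            show lst.map (fun seg => pre ++ seg)
                ++ [pre ++ [] ++ (cs.drop (k + 1)).take (index - 1 - (k + 1))]
              = (lst ++ [(cs.drop (k + 1)).take (index - 1 - (k + 1))]).map
                  (fun seg => pre ++ seg) from by simp]
        refine ih (cs.drop index) (by simp [List.length_drop]; omega) pre _ ?_
        rw [← hdd, ← pv_cd_inner_some _ 1 (k + 1) index (by omega) heq]
        exact hcd1
    · -- no '(' left: both sides are done
      have hnp : '(' ∉ cs := fun hmem =>
        hin ((PySem.Chars.isIn_iff_infix _ _).mpr ((pv_singleton_infix _ _).mpr hmem))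
      rw [pvLevel]
      simp only [hin]
      rw [pv_foldB_noparen pre _ hnp]
      simp

-- ===== VERDICT (by name: the statement is the Claim_ definition above) =====
theorem amp_spec : Claim_equal_amp := by
  intro s _ hpre
  unfold Spec_amp amp amp_alt
  simp only []
  unfold Pre_amp at hpre
  by_cases hf : PySem.Chars.find s.toList ['&', '('] = -1
  · -- no '&(' found: A maps over level(string[-1:]) = [], B returns []
    rw [if_pos hf] at hpre
    rw [hf, if_pos rfl, PySem.List.slice_from_neg_one]
    rcases hD : s.toList.drop (s.toList.length - 1) with _ | ⟨c, rest⟩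
    · rw [pvLevel]
      simp [PySem.Chars.isIn_iff_infix]
    · have hrest : rest = [] := by
        have hlen1 := congrArg List.length hD
        rw [List.length_drop] at hlen1
        cases rest with
        | nil => rfl
        | cons x xs => exfalso; simp at hlen1; omega
      subst hrest
      have hc : c ≠ '(' := by
        intro hc
        rw [hD, hc] at hpre
        simp [pvCd] at hpre
      have hinF : PySem.Chars.isIn ['('] [c] = false := by
        rcases hb : PySem.Chars.isIn ['('] [c] with _ | _
        · rfl
        · have h2 : '(' = c := by
            simpa using (pv_singleton_infix _ _).mp ((PySem.Chars.isIn_iff_infix _ _).mp hb)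
          exact absurd h2.symm hc
      rw [pvLevel]
      simp [hinF]
  · have hpos : 0 ≤ PySem.Chars.find s.toList ['&', '('] := by
      have := PySem.Chars.neg_one_le_find s.toList ['&', '(']
      omega
    rw [if_neg hf] at hpre
    rw [if_neg hf, PySem.List.slice_zero_start, PySem.List.slice_to _ hpos,
        PySem.List.slice_from _ hpos]
    have hmain := pv_main (s.toList.drop (PySem.Chars.find s.toList ['&', '(']).toNat).length 
      (s.toList.drop (PySem.Chars.find s.toList ['&', '(']).toNat) (le_refl _) (s.toList.take (PySem.Chars.find s.toList ['&', '(']).toNat ++ ['&']) [] hpre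
    simp only [List.map_nil] at hmain
    rw [hmain, List.map_map]
    apply List.map_congr_left
    intro seg _
    simp
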